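-- pv_equiv track=rewrite | github.com/ai-forever/paper_persi_chat | chat_scripts/chat_utils.py | join_segments
-- ===== SOURCE A (Python) =====
-- def join_segments(raw_segments, max_len=4500):
--     '''
--     Join paper segements (by same class and limited by max_len)
--     '''
--
--     indeces_sections = [[0,1]]
--
--     prev_title = raw_segments[2][-1]
--     i = 2
--     cur_section = []
--     while i < len(raw_segments):
--         cur_title = raw_segments[i][-1]
--         if cur_title == prev_title:
--             cur_section.append(i)
--         else:
--             indeces_sections.append(cur_section)
--             cur_section = [i]
--             prev_title = cur_title
--         i += 1
--
--     if len(cur_section) > 0: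
--         indeces_sections.append(cur_section)
--
--     joined_segments = []
--     for sec in indeces_sections:
--         cur_text = ''
--         cur_split = []
--
--         for idx in sec:
--             if len(cur_text + '\n' + raw_segments[idx][1]) < max_len or len(cur_text) == 0:
--                 cur_split.append({'id': raw_segments[idx][0],
--                                   'title': raw_segments[idx][-2], 'section_type': raw_segments[idx][-1]})
--                 cur_text = cur_text + '\n' + raw_segments[idx][1]
--                 cur_text = cur_text.strip()
--
--             else:
--                 joined_segments.append((cur_text, cur_split))
--                 cur_text = raw_segments[idx][1]
--                 cur_split = [{'id': raw_segments[idx][0],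
--                               'title': raw_segments[idx][-2], 'section_type': raw_segments[idx][-1]}]
--
--         if len(cur_text) > 0:
--             joined_segments.append((cur_text, cur_split))
--
--     return joined_segments
-- ===== SOURCE B (Python) =====
-- def join_segments(raw_segments, max_len=4500):
--     '''Single linear pass: group boundaries (forced break after segments 0-1,
--     then on every title change from index 2 on) flush the running chunk inline;
--     no intermediate table of index lists is built.'''
--     joined_segments = []
--     cur_text = ''
--     cur_split = []
--     prev_title = raw_segments[2][-1]
--     for i, seg in enumerate(raw_segments):
--         if i == 2 or (i > 2 and seg[-1] != prev_title):
--             # section boundary: flush the chunk of the finished section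
--             if len(cur_text) > 0:
--                 joined_segments.append((cur_text, cur_split))
--             cur_text = ''
--             cur_split = []
--             prev_title = seg[-1]
--         info = {'id': seg[0], 'title': seg[-2], 'section_type': seg[-1]}
--         if len(cur_text + '\n' + seg[1]) < max_len or len(cur_text) == 0:
--             cur_split.append(info)
--             cur_text = (cur_text + '\n' + seg[1]).strip()
--         else:
--             joined_segments.append((cur_text, cur_split))
--             cur_text = seg[1]
--             cur_split = [info]
--     if len(cur_text) > 0:
--         joined_segments.append((cur_text, cur_split))
--     return joined_segments
-- ===== Notes on version B (the rewrite author's own statement) =====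
-- stated objective: simpler
-- what changed: A's two phases (build a table of index lists grouped by section title, then re-index raw_segments to chunk each group) are collapsed into one linear pass over the segments that flushes the running chunk inline at section boundaries, with no intermediate index table.
import Mathlib
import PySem

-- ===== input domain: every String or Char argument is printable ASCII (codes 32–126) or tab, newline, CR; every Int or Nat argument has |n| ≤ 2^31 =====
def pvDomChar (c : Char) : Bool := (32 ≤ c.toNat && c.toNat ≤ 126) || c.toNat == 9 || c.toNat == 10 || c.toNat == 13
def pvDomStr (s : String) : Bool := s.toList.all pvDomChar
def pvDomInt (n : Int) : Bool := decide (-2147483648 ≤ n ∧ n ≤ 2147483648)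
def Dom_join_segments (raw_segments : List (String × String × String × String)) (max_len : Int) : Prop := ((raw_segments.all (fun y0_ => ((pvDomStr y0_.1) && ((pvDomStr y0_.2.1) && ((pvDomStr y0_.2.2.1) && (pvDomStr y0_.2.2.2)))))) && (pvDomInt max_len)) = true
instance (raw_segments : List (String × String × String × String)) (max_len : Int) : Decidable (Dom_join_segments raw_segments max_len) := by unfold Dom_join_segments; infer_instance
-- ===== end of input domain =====

-- B collapses A's two phases (index table of title runs, then per-section chunking)
-- into one linear pass over the segments that flushes chunks inline (objective: simpler
-- decomposition); return values agree on every input with at least 3 segments.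


abbrev PVSeg := String × String × String × String
abbrev PVOut := List (String × List (List (String × String)))
abbrev PVSt3 := PVOut × List Char × List (List (String × String))
abbrev PVSt4 := PVOut × List Char × List (List (String × String)) × String

-- ===== PORT A =====
-- literal port of A: phase 1 builds the list of index lists (forced [0,1] first group,
-- title runs from index 2 on), phase 2 chunks each index section by max_len.
-- cur_text is carried as List Char (PySem.Chars); raw_segments[2] raising = the `none` arm.
-- the body of A's while loop (phase 1); state = (indeces_sections, prev_title, cur_section)
def join_segments_loop1 (raw_segments : List PVSeg)
    (st : List (List Int) × String × List Int) (i : Int) : List (List Int) × String × List Int :=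
  let cur_title := (PySem.List.pyGetD raw_segments i ("", "", "", "")).2.2.2
  if cur_title == st.2.1 then (st.1, st.2.1, st.2.2 ++ [i])
  else (st.1 ++ [st.2.2], cur_title, [i])

-- the body of A's inner for loop (phase 2); state = (joined_segments, cur_text, cur_split)
def join_segments_chunk (raw_segments : List PVSeg) (max_len : Int)
    (st2 : PVSt3) (idx : Int) : PVSt3 :=
  if ((st2.2.1 ++ '\n' :: (PySem.List.pyGetD raw_segments idx ("", "", "", "")).2.1.toList).length : Int) < max_len
      || st2.2.1.length == 0 then
    (st2.1, PySem.Chars.strip (st2.2.1 ++ '\n' :: (PySem.List.pyGetD raw_segments idx ("", "", "", "")).2.1.toList),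
     st2.2.2 ++ [[("id", (PySem.List.pyGetD raw_segments idx ("", "", "", "")).1),
                  ("title", (PySem.List.pyGetD raw_segments idx ("", "", "", "")).2.2.1),
                  ("section_type", (PySem.List.pyGetD raw_segments idx ("", "", "", "")).2.2.2)]])
  else
    (st2.1 ++ [(String.ofList st2.2.1, st2.2.2)],
     (PySem.List.pyGetD raw_segments idx ("", "", "", "")).2.1.toList,
     [[("id", (PySem.List.pyGetD raw_segments idx ("", "", "", "")).1),
       ("title", (PySem.List.pyGetD raw_segments idx ("", "", "", "")).2.2.1),
       ("section_type", (PySem.List.pyGetD raw_segments idx ("", "", "", "")).2.2.2)]])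

-- the body of A's outer for loop over sections
def join_segments_sec (raw_segments : List PVSeg) (max_len : Int)
    (acc : PVOut) (sec : List Int) : PVOut :=
  let st2 := sec.foldl (join_segments_chunk raw_segments max_len) (acc, [], [])
  if st2.2.1.length > 0 then st2.1 ++ [(String.ofList st2.2.1, st2.2.2)] else st2.1

def join_segments (raw_segments : List (String × String × String × String)) (max_len : Int) : List (String × (List (List (String × String)))) :=
  match PySem.List.pyGet? raw_segments 2 with
  | none => []  -- IndexError in Python (fewer than 3 segments): outside Pre_
  | some seg2 =>
    let st := (PySem.List.pyRange 2 (raw_segments.length : Int)).foldl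
        (join_segments_loop1 raw_segments) ([[0, 1]], seg2.2.2.2, ([] : List Int))
    let indeces_sections := if st.2.2.length > 0 then st.1 ++ [st.2.2] else st.1
    indeces_sections.foldl (join_segments_sec raw_segments max_len) []

-- ===== PORT B =====
-- literal port of Source B: one fold over enumerate(raw_segments); state (out, cur_text,
-- cur_split, prev_title); a section boundary (i == 2, or i > 2 with a title change)
-- flushes the chunk inline.
-- the body of Source B's single for loop
def join_segments_alt_body (max_len : Int) (st : PVSt4) (p : Int × PVSeg) : PVSt4 :=
  let s := p.2
  let st1 : PVSt4 :=
    if p.1 == 2 || (decide (2 < p.1) && (s.2.2.2 != st.2.2.2)) then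
      ((if st.2.1.length > 0 then st.1 ++ [(String.ofList st.2.1, st.2.2.1)] else st.1),
       [], [], s.2.2.2)
    else st
  if ((st1.2.1 ++ '\n' :: s.2.1.toList).length : Int) < max_len || st1.2.1.length == 0 then
    (st1.1, PySem.Chars.strip (st1.2.1 ++ '\n' :: s.2.1.toList),
     st1.2.2.1 ++ [[("id", s.1), ("title", s.2.2.1), ("section_type", s.2.2.2)]], st1.2.2.2)
  else
    (st1.1 ++ [(String.ofList st1.2.1, st1.2.2.1)], s.2.1.toList,
     [[("id", s.1), ("title", s.2.2.1), ("section_type", s.2.2.2)]], st1.2.2.2)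

def join_segments_alt (raw_segments : List (String × String × String × String)) (max_len : Int) : List (String × (List (List (String × String)))) :=
  match PySem.List.pyGet? raw_segments 2 with
  | none => []  -- raw_segments[2] raises in Python B too: outside Pre_
  | some seg2 =>
    let st := (PySem.List.enumerate raw_segments 0).foldl
        (join_segments_alt_body max_len) ([], [], [], seg2.2.2.2)
    if st.2.1.length > 0 then st.1 ++ [(String.ofList st.2.1, st.2.2.1)] else st.1

-- ===== PRECONDITION & SPEC =====
-- Pre_: Python A evaluates raw_segments[2] unconditionally, so it raises IndexError on
-- fewer than 3 segments; exactly those inputs are excluded (B raises there too).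
def Pre_join_segments (raw_segments : List (String × String × String × String)) (max_len : Int) : Prop :=
  3 ≤ raw_segments.length
instance (raw_segments : List (String × String × String × String)) (max_len : Int) : Decidable (Pre_join_segments raw_segments max_len) := by unfold Pre_join_segments; infer_instance

def pvWitness_join_segments : (List (String × String × String × String)) × Int :=
  ([("a", "xx", "tA", "T1"), ("b", "yy", "tB", "T1"), ("c", "zz", "tC", "T2")], 10)

def Spec_join_segments (raw_segments : List (String × String × String × String)) (max_len : Int) (out : List (String × (List (List (String × String))))) : Prop := out = join_segments_alt raw_segments max_len
instance (raw_segments : List (String × String × String × String)) (max_len : Int) (out : List (String × (List (List (String × String))))) : Decidable (Spec_join_segments raw_segments max_len out) := by unfold Spec_join_segments; infer_instance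

-- ===== CLAIM (what is proved, stated in full; the proofs are below) =====
def Claim_equal_join_segments : Prop := ∀ (raw_segments : List (String × String × String × String)) (max_len : Int), Dom_join_segments raw_segments max_len → Pre_join_segments raw_segments max_len → Spec_join_segments raw_segments max_len (join_segments raw_segments max_len)

-- ===== LEMMAS AND PROOFS =====

def PVInfo (s : PVSeg) : List (String × String) :=
  [("id", s.1), ("title", s.2.2.1), ("section_type", s.2.2.2)]

-- the shared chunking step (the body of both inner loops), at segment level
def PVStep (max_len : Int) (st : PVSt3) (s : PVSeg) : PVSt3 :=
  if ((st.2.1 ++ '\n' :: s.2.1.toList).length : Int) < max_len || st.2.1.length == 0 then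
    (st.1, PySem.Chars.strip (st.2.1 ++ '\n' :: s.2.1.toList), st.2.2 ++ [PVInfo s])
  else
    (st.1 ++ [(String.ofList st.2.1, st.2.2)], s.2.1.toList, [PVInfo s])

def PVEnd (st : PVSt3) : PVOut :=
  if st.2.1.length > 0 then st.1 ++ [(String.ofList st.2.1, st.2.2)] else st.1

def PVTo3 (st : PVSt4) : PVSt3 := (st.1, st.2.1, st.2.2.1)
def PVTo4 (st : PVSt3) (pt : String) : PVSt4 := (st.1, st.2.1, st.2.2, pt)

-- the chunking step on B's 4-component state (prev_title untouched)
def PVCStep (max_len : Int) (st : PVSt4) (s : PVSeg) : PVSt4 :=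
  if ((st.2.1 ++ '\n' :: s.2.1.toList).length : Int) < max_len || st.2.1.length == 0 then
    (st.1, PySem.Chars.strip (st.2.1 ++ '\n' :: s.2.1.toList), st.2.2.1 ++ [PVInfo s], st.2.2.2)
  else
    (st.1 ++ [(String.ofList st.2.1, st.2.2.1)], s.2.1.toList, [PVInfo s], st.2.2.2)

-- B's boundary flush
def PVFlush (st : PVSt4) (newpt : String) : PVSt4 := (PVEnd (PVTo3 st), [], [], newpt)

-- B's index-free loop body (boundary on title change, then the chunking step)
def PVBStep (max_len : Int) (st : PVSt4) (s : PVSeg) : PVSt4 :=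
  PVCStep max_len (if s.2.2.2 != st.2.2.2 then PVFlush st s.2.2.2 else st) s

-- the run decomposition A's phase 1 computes (beyond the forced first group)
def PVRuns (t : List PVSeg) (pt : String) (cur : List PVSeg) : List (List PVSeg) :=
  match t with
  | [] => if cur.length > 0 then [cur] else []
  | s :: t' => if s.2.2.2 == pt then PVRuns t' pt (cur ++ [s]) else cur :: PVRuns t' s.2.2.2 [s]

-- A's phase 2, section by section, at segment level
def PVPhase2 (max_len : Int) (acc : PVOut) : List (List PVSeg) → PVOut
  | [] => acc
  | sec :: secs => PVPhase2 max_len (PVEnd (sec.foldl (PVStep max_len) (acc, [], []))) secs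

-- A's phase-1 loop body, at segment level
def PVGStep (st : List (List PVSeg) × String × List PVSeg) (s : PVSeg) :
    List (List PVSeg) × String × List PVSeg :=
  if s.2.2.2 == st.2.1 then (st.1, st.2.1, st.2.2 ++ [s]) else (st.1 ++ [st.2.2], s.2.2.2, [s])

-- B's loop body at index 0: plain chunking step
theorem pv_body0 (max_len : Int) (st : PVSt4) (s : PVSeg) :
    join_segments_alt_body max_len st ((0 : Int), s) = PVCStep max_len st s := by
  simp only [join_segments_alt_body, PVCStep, PVInfo]
  norm_num

-- B's loop body at index 1: plain chunking step
theorem pv_body1 (max_len : Int) (st : PVSt4) (s : PVSeg) :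
    join_segments_alt_body max_len st ((1 : Int), s) = PVCStep max_len st s := by
  simp only [join_segments_alt_body, PVCStep, PVInfo]
  norm_num

-- B's loop body at index 2: forced flush, then the chunking step
theorem pv_body2 (max_len : Int) (st : PVSt4) (s : PVSeg) :
    join_segments_alt_body max_len st ((2 : Int), s)
    = PVCStep max_len (PVFlush st s.2.2.2) s := by
  simp only [join_segments_alt_body, PVCStep, PVFlush, PVEnd, PVTo3, PVInfo]
  norm_num

-- B's loop body at index ≥ 3: the index-free body
theorem pv_bodyk (max_len : Int) (st : PVSt4) (k : ℕ) (s : PVSeg) (hk : 3 ≤ k) :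
    join_segments_alt_body max_len st ((k : Int), s) = PVBStep max_len st s := by
  have h2 : ((k : Int) == 2) = false := by
    simp only [beq_eq_false_iff_ne, ne_eq]; omega
  have h3 : decide (2 < (k : Int)) = true := by
    simp only [decide_eq_true_eq]; omega
  simp only [join_segments_alt_body, PVBStep, PVCStep, PVFlush, PVEnd, PVTo3, PVInfo,
    h2, h3, Bool.false_or, Bool.true_and]

-- the 4-state chunking step through the 3-state one
theorem pv_cstep_to4 (max_len : Int) (st3 : PVSt3) (pt : String) (s : PVSeg) :
    PVCStep max_len (PVTo4 st3 pt) s = PVTo4 (PVStep max_len st3 s) pt := by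
  rcases st3 with ⟨a, b, c⟩
  dsimp only [PVCStep, PVStep, PVTo4]
  split <;> rfl

-- PVBStep within a title run continues the chunking step
theorem pv_bstep_same (max_len : Int) (st3 : PVSt3) (pt : String) (s : PVSeg)
    (hb : (s.2.2.2 != pt) = false) :
    PVBStep max_len (PVTo4 st3 pt) s = PVTo4 (PVStep max_len st3 s) pt := by
  have hpt : (PVTo4 st3 pt).2.2.2 = pt := rfl
  simp only [PVBStep, hpt, hb, Bool.false_eq_true, if_false]
  exact pv_cstep_to4 max_len st3 pt s

-- PVBStep at a title change flushes, resets, and restarts the chunk with s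
theorem pv_bstep_diff (max_len : Int) (st3 : PVSt3) (pt : String) (s : PVSeg)
    (hb : (s.2.2.2 != pt) = true) :
    PVBStep max_len (PVTo4 st3 pt) s
    = PVTo4 (PVStep max_len (PVEnd st3, [], []) s) s.2.2.2 := by
  have hpt : (PVTo4 st3 pt).2.2.2 = pt := rfl
  simp only [PVBStep, hpt, hb, if_true]
  have hf : PVFlush (PVTo4 st3 pt) s.2.2.2 = PVTo4 (PVEnd st3, [], []) s.2.2.2 := rfl
  rw [hf, pv_cstep_to4]

-- MAIN: B's single pass from a mid-section state equals A's per-run phase 2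
theorem pv_main (max_len : Int) (t : List PVSeg) :
    ∀ (pt : String) (cur : List PVSeg) (acc : PVOut),
    PVEnd (PVTo3 (t.foldl (PVBStep max_len) (PVTo4 (cur.foldl (PVStep max_len) (acc, [], [])) pt)))
    = PVPhase2 max_len acc (PVRuns t pt cur) := by
  induction t with
  | nil =>
    intro pt cur acc
    rcases cur with _ | ⟨c, cur'⟩
    · simp [PVRuns, PVTo3, PVTo4, PVEnd, PVPhase2]
    · simp only [PVRuns, List.length_cons, List.foldl_nil]
      rw [if_pos (by omega)]
      simp [PVPhase2, PVTo3, PVTo4]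
  | cons s t' ih =>
    intro pt cur acc
    by_cases h : s.2.2.2 == pt
    · have hb : (s.2.2.2 != pt) = false := by simp_all [bne]
      simp only [List.foldl_cons, PVRuns, h, if_true]
      rw [pv_bstep_same max_len _ pt s hb, show PVStep max_len (cur.foldl (PVStep max_len) (acc, [], [])) s
            = (cur ++ [s]).foldl (PVStep max_len) (acc, [], []) by simp [List.foldl_append]]
      exact ih pt (cur ++ [s]) acc
    · have hb : (s.2.2.2 != pt) = true := by simp_all [bne]
      simp only [List.foldl_cons, PVRuns, h, Bool.false_eq_true, if_false]
      rw [pv_bstep_diff max_len _ pt s hb]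
      have := ih s.2.2.2 [s] (PVEnd (cur.foldl (PVStep max_len) (acc, [], [])))
      simp only [List.foldl_cons, List.foldl_nil] at this
      rw [this]
      simp [PVPhase2]

-- A's phase-1 index loop over pyRange equals the segment-level loop, through lookups
theorem pv_range (raw : List PVSeg) (t : List PVSeg) :
    ∀ (k : ℕ) (secs : List (List Int)) (pt : String) (cur : List Int),
    raw.drop k = t →
    (let st := (PySem.List.pyRange (k : Int) (raw.length : Int)).foldl
        (join_segments_loop1 raw) (secs, pt, cur)
     (st.1.map (List.map (fun i => PySem.List.pyGetD raw i ("", "", "", ""))), st.2.1,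
      st.2.2.map (fun i => PySem.List.pyGetD raw i ("", "", "", ""))))
    = t.foldl PVGStep
        (secs.map (List.map (fun i => PySem.List.pyGetD raw i ("", "", "", ""))), pt,
         cur.map (fun i => PySem.List.pyGetD raw i ("", "", "", ""))) := by
  induction t with
  | nil =>
    intro k secs pt cur hk
    have hlen : raw.length ≤ k := by
      have := congrArg List.length hk
      simp only [List.length_drop, List.length_nil] at this
      omega
    have hnil : PySem.List.pyRange (k : Int) (raw.length : Int) = [] := by
      rw [PySem.List.pyRange_one]
      have : ((raw.length : Int) - (k : Int)).toNat = 0 := by omega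
      simp [this]
    simp [hnil]
  | cons s t' ih =>
    intro k secs pt cur hk
    have hklt : k < raw.length := by
      rcases Nat.lt_or_ge k raw.length with h | h
      · exact h
      · rw [List.drop_eq_nil_of_le h] at hk; cases hk
    have hcast : ((k : Int) + 1) = ((k + 1 : ℕ) : Int) := by push_cast; ring
    have hcons : PySem.List.pyRange (k : Int) (raw.length : Int)
        = (k : Int) :: PySem.List.pyRange ((k + 1 : ℕ) : Int) (raw.length : Int) := by
      rw [PySem.List.pyRange_one_cons (by exact_mod_cast hklt), hcast]
    have hgk : PySem.List.pyGetD raw (k : Int) ("", "", "", "") = s := by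
      rw [PySem.List.pyGetD_natCast]
      have h9 : raw[k]? = some s := by
        rw [← List.head?_drop, hk]; rfl
      simp [List.getD, h9]
    have hdrop : raw.drop (k + 1) = t' := by
      have := congrArg List.tail hk
      simpa [← List.tail_drop] using this
    rw [hcons]
    simp only [List.foldl_cons, join_segments_loop1, hgk]
    by_cases h : s.2.2.2 == pt
    · simp only [h, if_true]
      have := ih (k + 1) secs pt (cur ++ [(k : Int)]) hdrop
      simp only [List.map_append, List.map_cons, List.map_nil, hgk] at this
      rw [this]
      simp only [List.foldl_cons, PVGStep, h, if_true]
    · simp only [h, Bool.false_eq_true, if_false]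
      have := ih (k + 1) (secs ++ [cur]) s.2.2.2 [(k : Int)] hdrop
      simp only [List.map_append, List.map_cons, List.map_nil, hgk] at this
      rw [this]
      simp only [List.foldl_cons, PVGStep, h, Bool.false_eq_true, if_false]

-- finalizing A's phase-1 state yields the run decomposition
theorem pv_groups (t : List PVSeg) :
    ∀ (pt : String) (secs : List (List PVSeg)) (cur : List PVSeg),
    (let st := t.foldl PVGStep (secs, pt, cur);
     if st.2.2.length > 0 then st.1 ++ [st.2.2] else st.1)
    = secs ++ PVRuns t pt cur := by
  induction t with
  | nil =>
    intro pt secs cur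
    rcases cur with _ | ⟨c, cur'⟩
    · simp [PVRuns]
    · simp only [List.foldl_nil, PVRuns, List.length_cons]
      rw [if_pos (by omega), if_pos (by omega)]
  | cons s t' ih =>
    intro pt secs cur
    by_cases h : s.2.2.2 == pt
    · simp only [List.foldl_cons, PVGStep, h, if_true, PVRuns]
      exact ih pt secs (cur ++ [s])
    · simp only [List.foldl_cons, PVGStep, h, Bool.false_eq_true, if_false, PVRuns]
      rw [ih s.2.2.2 (secs ++ [cur]) [s]]
      simp

-- A's phase-2 fold over index sections equals PVPhase2 over the mapped sections
theorem pv_phase2 (raw : List PVSeg) (max_len : Int) (secsI : List (List Int)) :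
    ∀ (acc : PVOut),
    secsI.foldl (join_segments_sec raw max_len) acc
    = PVPhase2 max_len acc
        (secsI.map (List.map (fun i => PySem.List.pyGetD raw i ("", "", "", "")))) := by
  induction secsI with
  | nil => intro acc; simp [PVPhase2]
  | cons sec secsI' ih =>
    intro acc
    simp only [List.foldl_cons, List.map_cons, PVPhase2]
    rw [ih]
    congr 1
    simp only [join_segments_sec, PVEnd]
    rw [List.foldl_map]
    rfl

-- B's fold over enumerate, from index ≥ 3 on, equals the index-free pass
theorem pv_enum (max_len : Int) (t : List PVSeg) :
    ∀ (k : ℕ) (st : PVSt4), 3 ≤ k →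
    (PySem.List.enumerate t (k : Int)).foldl (join_segments_alt_body max_len) st
    = t.foldl (PVBStep max_len) st := by
  induction t with
  | nil => intro k st hk; rfl
  | cons s t' ih =>
    intro k st hk
    rw [PySem.List.enumerate_cons]
    simp only [List.foldl_cons]
    rw [show ((k : Int) + 1) = ((k + 1 : ℕ) : Int) by push_cast; ring]
    rw [ih (k + 1) _ (by omega), pv_bodyk max_len st k s hk]

-- A unravelled on a list with at least 3 elements
theorem pv_a_eq (max_len : Int) (a b c : PVSeg) (rest : List PVSeg) :
    join_segments (a :: b :: c :: rest) max_len
    = PVPhase2 max_len [] ([a, b] :: PVRuns (c :: rest) c.2.2.2 []) := by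
  have hget : PySem.List.pyGet? (a :: b :: c :: rest) (2 : Int) = some c := by
    have := PySem.List.pyGet?_natCast (a :: b :: c :: rest) 2
    simpa using this
  simp only [join_segments, hget]
  have h2 : (2 : Int) = ((2 : ℕ) : Int) := by norm_num
  have hr := pv_range (a :: b :: c :: rest) (c :: rest) 2 [[0, 1]] c.2.2.2 [] rfl
  simp only at hr
  rw [h2, pv_phase2]
  congr 1
  have h1 :
      ((if ((PySem.List.pyRange ((2:ℕ) : Int) ((a :: b :: c :: rest).length : Int)).foldl
            (join_segments_loop1 (a :: b :: c :: rest)) ([[0, 1]], c.2.2.2, [])).2.2.length > 0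
        then ((PySem.List.pyRange ((2:ℕ) : Int) ((a :: b :: c :: rest).length : Int)).foldl
            (join_segments_loop1 (a :: b :: c :: rest)) ([[0, 1]], c.2.2.2, [])).1
          ++ [((PySem.List.pyRange ((2:ℕ) : Int) ((a :: b :: c :: rest).length : Int)).foldl
            (join_segments_loop1 (a :: b :: c :: rest)) ([[0, 1]], c.2.2.2, [])).2.2]
        else ((PySem.List.pyRange ((2:ℕ) : Int) ((a :: b :: c :: rest).length : Int)).foldl
            (join_segments_loop1 (a :: b :: c :: rest)) ([[0, 1]], c.2.2.2, [])).1).map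
        (List.map (fun i => PySem.List.pyGetD (a :: b :: c :: rest) i ("", "", "", ""))))
      = [a, b] :: PVRuns (c :: rest) c.2.2.2 [] := by
    set F := (PySem.List.pyRange ((2:ℕ) : Int) ((a :: b :: c :: rest).length : Int)).foldl
        (join_segments_loop1 (a :: b :: c :: rest)) ([[0, 1]], c.2.2.2, []) with hF
    set M := fun i => PySem.List.pyGetD (a :: b :: c :: rest) i ("", "", "", "") with hM
    have hMa : M (0 : Int) = a := by rw [hM]; simp
    have hMb : M (1 : Int) = b := by
      rw [hM]
      have := PySem.List.pyGetD_natCast (a :: b :: c :: rest) 1 ("", "", "", "")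
      simpa using this
    have hr1 : F.1.map (List.map M) = ((c :: rest).foldl PVGStep ([[M 0, M 1]], c.2.2.2, [])).1 := by
      have := congrArg Prod.fst hr
      simpa using this
    have hr3 : F.2.2.map M = ((c :: rest).foldl PVGStep ([[M 0, M 1]], c.2.2.2, [])).2.2 := by
      have := congrArg (fun q => q.2.2) hr
      simpa using this
    have hlen : (F.2.2.length > 0) ↔ (((c :: rest).foldl PVGStep ([[M 0, M 1]], c.2.2.2, [])).2.2.length > 0) := by
      rw [← hr3]
      simp
    have hg := pv_groups (c :: rest) c.2.2.2 [[M 0, M 1]] []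
    simp only at hg
    by_cases hc : F.2.2.length > 0
    · rw [if_pos hc, List.map_append, List.map_cons, List.map_nil, hr1, hr3]
      rw [if_pos (hlen.mp hc)] at hg
      rw [hg, hMa, hMb]
      rfl
    · rw [if_neg hc, hr1]
      rw [if_neg (fun h => hc (hlen.mpr h))] at hg
      rw [hg, hMa, hMb]
      rfl
  exact h1

-- B unravelled on a list with at least 3 elements
theorem pv_b_eq (max_len : Int) (a b c : PVSeg) (rest : List PVSeg) :
    join_segments_alt (a :: b :: c :: rest) max_len
    = PVEnd (PVTo3 (rest.foldl (PVBStep max_len)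
        (PVTo4 ([c].foldl (PVStep max_len)
          (PVEnd ([a, b].foldl (PVStep max_len) ([], [], [])), [], [])) c.2.2.2))) := by
  have hget : PySem.List.pyGet? (a :: b :: c :: rest) (2 : Int) = some c := by
    have := PySem.List.pyGet?_natCast (a :: b :: c :: rest) 2
    simpa using this
  simp only [join_segments_alt, hget]
  have henum : PySem.List.enumerate (a :: b :: c :: rest) (0 : Int)
      = ((0 : Int), a) :: ((1 : Int), b) :: ((2 : Int), c) :: PySem.List.enumerate rest ((3 : ℕ) : Int) := by
    norm_num [PySem.List.enumerate_cons]
  rw [henum]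
  simp only [List.foldl_cons]
  rw [pv_body0, pv_body1, pv_body2, pv_enum max_len rest 3 _ (by norm_num)]
  have hst : PVCStep max_len (PVFlush (PVCStep max_len (PVCStep max_len ([], [], [], c.2.2.2) a) b) c.2.2.2) c
      = PVTo4 ([c].foldl (PVStep max_len)
          (PVEnd ([a, b].foldl (PVStep max_len) ([], [], [])), [], [])) c.2.2.2 := by
    have e0 : (([], [], [], c.2.2.2) : PVSt4) = PVTo4 ([], [], []) c.2.2.2 := rfl
    rw [e0, pv_cstep_to4, pv_cstep_to4]
    have e1 : PVFlush (PVTo4 (PVStep max_len (PVStep max_len ([], [], []) a) b) c.2.2.2) c.2.2.2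
        = PVTo4 (PVEnd (PVStep max_len (PVStep max_len ([], [], []) a) b), [], []) c.2.2.2 := rfl
    rw [e1, pv_cstep_to4]
    simp [List.foldl_cons]
  rw [hst]
  rfl

-- ===== VERDICT (by name: the statement is the Claim_ definition above) =====
theorem join_segments_spec : Claim_equal_join_segments := by
  intro raw_segments max_len _hdom hpre
  unfold Pre_join_segments at hpre
  unfold Spec_join_segments
  rcases raw_segments with _ | ⟨a, _ | ⟨b, _ | ⟨c, rest⟩⟩⟩
  · simp at hpre
  · simp at hpre
  · simp at hpre
  · rw [pv_a_eq, pv_b_eq]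
    have := pv_main max_len rest c.2.2.2 [c] (PVEnd ([a, b].foldl (PVStep max_len) ([], [], [])))
    rw [this]
    have hruns : PVRuns (c :: rest) c.2.2.2 [] = PVRuns rest c.2.2.2 [c] := by
      simp [PVRuns]
    rw [hruns]
    simp [PVPhase2]
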